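-- pv_equiv track=rewrite | github.com/nemo6655/TDPFuzz | genvariants_parallel_net.py | fix_unclosed_strings
-- ===== SOURCE A (Python) =====
-- def fix_unclosed_strings(text):
--     quote_char = None
--     escaped = False
--     for char in text:
--         if escaped:
--             escaped = False
--             continue
--         if char == '\\':
--             escaped = True
--             continue
--         if quote_char:
--             if char == quote_char:
--                 quote_char = None
--         else:
--             if char in '"\'':
--                 quote_char = char
--
--     if quote_char:
--         text += quote_char
--     return text
-- ===== SOURCE B (Python) =====
-- def fix_unclosed_strings(text):
--     i = 0
--     n = len(text)
--     open_q = None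
--     while i < n:
--         c = text[i]
--         if c == '\\':
--             i += 2
--             continue
--         if c in '"\'':
--             open_q = c
--             i += 1
--             while i < n:
--                 d = text[i]
--                 if d == '\\':
--                     i += 2
--                     continue
--                 i += 1
--                 if d == open_q:
--                     open_q = None
--                     break
--         else:
--             i += 1
--     if open_q:
--         text += open_q
--     return text
-- ===== Notes on version B (the rewrite author's own statement) =====
-- stated objective: alternative
-- what changed: Replaced the flat flag-driven state machine (quote_char/escaped booleans updated uniformly per char) with an index-based nested scan: an outer while loop over unquoted text that, on an opening quote, runs an inner while loop seeking the matching close, with backslash escapes handled by an i+=2 skip instead of an escaped flag.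
import Mathlib
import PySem

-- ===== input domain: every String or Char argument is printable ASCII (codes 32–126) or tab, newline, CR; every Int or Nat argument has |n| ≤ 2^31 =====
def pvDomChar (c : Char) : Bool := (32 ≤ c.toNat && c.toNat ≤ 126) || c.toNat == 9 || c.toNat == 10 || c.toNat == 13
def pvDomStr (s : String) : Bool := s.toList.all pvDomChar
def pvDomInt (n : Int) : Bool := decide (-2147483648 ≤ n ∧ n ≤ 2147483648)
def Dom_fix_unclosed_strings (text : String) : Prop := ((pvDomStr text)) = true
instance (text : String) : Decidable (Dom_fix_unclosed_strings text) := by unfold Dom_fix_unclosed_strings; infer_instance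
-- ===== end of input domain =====

-- B replaces A's flat per-character flag machine by an index-based outer/inner region scan with
-- an i+=2 escape skip; same O(n) cost, different decomposition (objective: alternative).

-- ===== PORT A =====
-- A's single pass: state (quote_char, escaped), one step per character, in A's branch order.
def pvAStep (s : Option Char × Bool) (c : Char) : Option Char × Bool :=
  match s with
  | (q, true) => (q, false)
  | (q, false) =>
    if c = '\\' then (q, true)
    else
      match q with
      | some qc => if c = qc then (none, false) else (some qc, false)
      | none => if c = '"' ∨ c = '\'' then (some c, false) else (none, false)

def fix_unclosed_strings (text : String) : String :=
  match (text.toList.foldl pvAStep (none, false)).1 with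
  | some q => String.ofList (text.toList ++ [q])   -- text += quote_char  (PySem-exact append)
  | none => text

-- ===== PORT B =====
-- B's nested while loops: pvBOuter is the outer loop (not inside a string), pvBInner the inner
-- loop scanning for the close of quote q; '\\' does the i+=2 skip via List.tail.
mutual
def pvBOuter : List Char → Option Char
  | [] => none
  | c :: rest =>
    if c = '\\' then pvBOuter rest.tail
    else if c = '"' ∨ c = '\'' then pvBInner c rest
    else pvBOuter rest
termination_by l => l.length
decreasing_by
  · simp
  · simp
  · simp

def pvBInner (q : Char) : List Char → Option Char
  | [] => some q
  | d :: rest =>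
    if d = '\\' then pvBInner q rest.tail
    else if d = q then pvBOuter rest
    else pvBInner q rest
termination_by l => l.length
decreasing_by
  · simp
  · simp
  · simp
end

def fix_unclosed_strings_alt (text : String) : String :=
  match pvBOuter text.toList with
  | some q => String.ofList (text.toList ++ [q])
  | none => text

-- ===== PRECONDITION & SPEC =====
def Spec_fix_unclosed_strings (text : String) (out : String) : Prop := out = fix_unclosed_strings_alt text
instance (text : String) (out : String) : Decidable (Spec_fix_unclosed_strings text out) := by unfold Spec_fix_unclosed_strings; infer_instance

-- ===== CLAIM (what is proved, stated in full; the proofs are below) =====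
def Claim_equal_fix_unclosed_strings : Prop := ∀ (text : String), Dom_fix_unclosed_strings text → Spec_fix_unclosed_strings text (fix_unclosed_strings text)

-- ===== LEMMAS AND PROOFS =====

-- After a backslash, A consumes the next character (if any) doing nothing: the escaped state
-- on l behaves like the unescaped state on l.tail.
theorem pvAStep_escaped (l : List Char) (q : Option Char) :
    List.foldl pvAStep (q, true) l = if l = [] then (q, true) else List.foldl pvAStep (q, false) l.tail := by
  cases l with
  | nil => simp
  | cons d rest => simp [pvAStep]

-- Core invariant: A's fold from the quote-free (resp. inside-quote q) state computes B's
-- outer (resp. inner) scan result, by strong induction on the length.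
theorem pvFold_eq_scan (n : Nat) :
    ∀ l : List Char, l.length ≤ n →
      (List.foldl pvAStep (none, false) l).1 = pvBOuter l ∧
      ∀ q : Char, (List.foldl pvAStep (some q, false) l).1 = pvBInner q l := by
  induction n with
  | zero =>
    intro l hl
    have : l = [] := List.eq_nil_of_length_eq_zero (Nat.le_zero.mp hl)
    subst this
    simp [pvBOuter, pvBInner]
  | succ n ih =>
    intro l hl
    cases l with
    | nil => simp [pvBOuter, pvBInner]
    | cons c rest =>
      have hrest : rest.length ≤ n := by simpa using hl
      constructor
      · by_cases hbs : c = '\\'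
        · subst hbs
          simp only [List.foldl_cons]
          rw [show pvAStep (none, false) '\\' = (none, true) from by simp [pvAStep],
              pvAStep_escaped, show pvBOuter ('\\' :: rest) = pvBOuter rest.tail from by
                simp [pvBOuter]]
          cases rest with
          | nil => simp [pvBOuter]
          | cons d rest' =>
            simp only [List.tail_cons, if_neg (by simp : (d :: rest') ≠ [])]
            exact ((ih _ (le_trans (Nat.le_succ _) hrest)).1)
        · by_cases hq : c = '"' ∨ c = '\''
          · simp only [List.foldl_cons]
            rw [show pvAStep (none, false) c = (some c, false) from by simp [pvAStep, hbs, hq],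
                show pvBOuter (c :: rest) = pvBInner c rest from by simp [pvBOuter, hbs, hq]]
            exact (ih rest hrest).2 c
          · simp only [List.foldl_cons]
            rw [show pvAStep (none, false) c = (none, false) from by simp [pvAStep, hbs, hq],
                show pvBOuter (c :: rest) = pvBOuter rest from by simp [pvBOuter, hbs, hq]]
            exact (ih rest hrest).1
      · intro q
        by_cases hbs : c = '\\'
        · subst hbs
          simp only [List.foldl_cons]
          rw [show pvAStep (some q, false) '\\' = (some q, true) from by simp [pvAStep],
              pvAStep_escaped, show pvBInner q ('\\' :: rest) = pvBInner q rest.tail from by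
                simp [pvBInner]]
          cases rest with
          | nil => simp [pvBInner]
          | cons d rest' =>
            simp only [List.tail_cons, if_neg (by simp : (d :: rest') ≠ [])]
            exact ((ih _ (le_trans (Nat.le_succ _) hrest)).2 q)
        · by_cases heq : c = q
          · subst heq
            simp only [List.foldl_cons]
            rw [show pvAStep (some c, false) c = (none, false) from by simp [pvAStep, hbs],
                show pvBInner c (c :: rest) = pvBOuter rest from by simp [pvBInner, hbs]]
            exact (ih rest hrest).1
          · simp only [List.foldl_cons]
            rw [show pvAStep (some q, false) c = (some q, false) from by simp [pvAStep, hbs, heq],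
                show pvBInner q (c :: rest) = pvBInner q rest from by simp [pvBInner, hbs, heq]]
            exact (ih rest hrest).2 q

-- ===== VERDICT (by name: the statement is the Claim_ definition above) =====
theorem fix_unclosed_strings_spec : Claim_equal_fix_unclosed_strings := by
  intro text _
  unfold Spec_fix_unclosed_strings fix_unclosed_strings fix_unclosed_strings_alt
  rw [(pvFold_eq_scan text.toList.length text.toList le_rfl).1]
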